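-- pv_equiv track=rewrite | github.com/mg6/advent-of-code-2017 | day13-packet-scanners/run.py | trip_severity
-- ===== SOURCE A (Python) =====
-- def scanner(depth):
--     """
--     Generates scanner positions for given depth.
--     """
--     if depth > 1:
--         while True:
--             for i in range(depth-1):
--                 yield i
--             for i in range(depth-1, 0, -1):
--                 yield i
--     elif depth == 1:
--         while True:
--             yield 0
--     else:
--         while True:
--             yield None
--
-- def trip_severity(depths, delay=0):
--     severity = None
--     scanners = [scanner(n) for n in depths]
--
--     for _ in range(delay):
--         for s in scanners:
--             next(s)
--
--     for layer, depth in enumerate(depths):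
--         positions = [next(s) for s in scanners]
--         if positions[layer] == 0:
--             if severity is None:
--                 severity = 0
--             severity += layer * depth
--
--     return severity
-- ===== SOURCE B (Python) =====
-- def trip_severity(depths, delay=0):
--     t0 = delay if delay > 0 else 0
--     severity = None
--     for layer, depth in enumerate(depths):
--         caught = depth == 1 or (depth > 1 and (t0 + layer) % (2 * (depth - 1)) == 0)
--         if caught:
--             severity = (0 if severity is None else severity) + layer * depth
--     return severity
-- ===== Notes on version B (the rewrite author's own statement) =====
-- stated objective: faster
-- what changed: B replaces A's per-tick simulation of every scanner generator (delay ticks plus one tick per layer, each tick advancing all L generators) by a single pass that decides each layer directly with the modular test (delay+layer) % (2*(depth-1)) == 0.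
import Mathlib
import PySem

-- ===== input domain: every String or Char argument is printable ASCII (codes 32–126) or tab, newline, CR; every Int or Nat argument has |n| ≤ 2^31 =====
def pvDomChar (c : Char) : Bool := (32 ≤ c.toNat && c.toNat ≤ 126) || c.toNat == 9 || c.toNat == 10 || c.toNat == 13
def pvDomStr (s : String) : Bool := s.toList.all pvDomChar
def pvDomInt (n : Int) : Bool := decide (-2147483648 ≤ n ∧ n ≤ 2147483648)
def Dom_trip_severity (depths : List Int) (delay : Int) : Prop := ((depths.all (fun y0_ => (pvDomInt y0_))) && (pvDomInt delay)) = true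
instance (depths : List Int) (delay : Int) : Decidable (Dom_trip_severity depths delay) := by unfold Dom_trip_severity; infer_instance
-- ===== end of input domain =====

-- B replaces A's per-tick generator simulation by a single O(L) pass deciding each layer
-- with the modular test (delay+layer) % (2*(depth-1)) == 0; equal return values are proved.

-- ===== PORT A =====
-- A scanner generator is modelled by its yield stream: a scanner is the pair (depth, k)
-- where k counts the next() calls made so far; pvScanVal depth k is the value the
-- generator yields on its (k+1)-th next() (exact for `scanner`'s cyclic up-then-down
-- stream when depth > 1; `none` models the `yield None` branch).
def pvScanVal (depth k : Int) : Option Int :=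
  if 1 < depth then
    some (if PySem.Int.mod k (2 * (depth - 1)) < depth - 1
          then PySem.Int.mod k (2 * (depth - 1))
          else 2 * (depth - 1) - PySem.Int.mod k (2 * (depth - 1)))
  else if depth = 1 then some 0
  else none

-- the `for layer, depth in enumerate(depths)` loop, carrying (layer, severity, scanners);
-- `positions = [next(s) for s in scanners]` reads each scanner at its counter and bumps it
def pvLoopA : List Int → Int → Option Int → List (Int × Int) → Option Int
  | [], _, sev, _ => sev
  | depth :: rest, layer, sev, scanners =>
      pvLoopA rest (layer + 1)
        (if PySem.List.pyGet? (scanners.map (fun s => pvScanVal s.1 s.2)) layer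
            = some (some 0)
         then some (sev.getD 0 + layer * depth) else sev)
        (scanners.map (fun s => (s.1, s.2 + 1)))

def trip_severity (depths : List Int) (delay : Int) : Option Int :=
  pvLoopA depths 0 none
    ((PySem.List.pyRange 0 delay 1).foldl
      (fun sc _ => sc.map (fun s => (s.1, s.2 + 1)))
      (depths.map (fun n => (n, (0 : Int)))))

-- ===== PORT B =====
def pvAltGo (t0 : Int) : List Int → Int → Option Int → Option Int
  | [], _, sev => sev
  | depth :: rest, layer, sev =>
      pvAltGo t0 rest (layer + 1)
        (if depth = 1 ∨ (1 < depth ∧ PySem.Int.mod (t0 + layer) (2 * (depth - 1)) = 0)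
         then some (sev.getD 0 + layer * depth) else sev)

def trip_severity_alt (depths : List Int) (delay : Int) : Option Int :=
  pvAltGo (if delay > 0 then delay else 0) depths 0 none

-- ===== PRECONDITION & SPEC =====
def Spec_trip_severity (depths : List Int) (delay : Int) (out : Option Int) : Prop := out = trip_severity_alt depths delay
instance (depths : List Int) (delay : Int) (out : Option Int) : Decidable (Spec_trip_severity depths delay out) := by unfold Spec_trip_severity; infer_instance

-- ===== CLAIM (what is proved, stated in full; the proofs are below) =====
def Claim_equal_trip_severity : Prop := ∀ (depths : List Int) (delay : Int), Dom_trip_severity depths delay → Spec_trip_severity depths delay (trip_severity depths delay)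

-- ===== LEMMAS AND PROOFS =====

-- the generator yields 0 exactly when the layer catches the packet
theorem pvScanVal_eq_some_zero (d k : Int) :
    pvScanVal d k = some 0 ↔ d = 1 ∨ (1 < d ∧ PySem.Int.mod k (2 * (d - 1)) = 0) := by
  by_cases h1 : 1 < d
  · have h0 : 0 ≤ PySem.Int.mod k (2 * (d - 1)) := PySem.Int.mod_nonneg _ (by omega)
    have hlt : PySem.Int.mod k (2 * (d - 1)) < 2 * (d - 1) := PySem.Int.mod_lt _ (by omega)
    simp only [pvScanVal, if_pos h1, Option.some.injEq]
    split_ifs with hc <;> omega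
  · by_cases h2 : d = 1
    · simp [pvScanVal, h2]
    · simp [pvScanVal, h1, h2]

-- indexing the positions comprehension at the current layer
theorem pvPyGetAt {β : Type} (g : Int → β) (pre : List Int) (d : Int) (suf : List Int) :
    PySem.List.pyGet? ((pre ++ d :: suf).map g) ((pre.length : Int)) = some (g d) := by
  rw [List.map_append, List.map_cons]
  simp

-- the delay loop bumps every scanner's counter once per iteration
theorem pvDelayFold (l : List Int) (sc : List (Int × Int)) :
    l.foldl (fun sc _ => sc.map (fun s => (s.1, s.2 + 1))) sc
      = sc.map (fun s => (s.1, s.2 + (l.length : Int))) := by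
  induction l generalizing sc with
  | nil => simp
  | cons x xs ih =>
      simp only [List.foldl_cons, ih, List.map_map]
      apply List.map_congr_left
      intro s _
      simp only [Function.comp_apply, Prod.mk.injEq, List.length_cons]
      push_cast
      exact ⟨by trivial, by ring⟩

theorem pvRangeLen (d : Int) :
    ((PySem.List.pyRange 0 d 1).length : Int) = if d > 0 then d else 0 := by
  simp only [PySem.List.pyRange]
  split_ifs with h h1 h2 <;> simp_all
  omega

-- main loop invariant: with every counter at D + layer, A's loop computes B's loop
theorem pvLoopA_eq (suf : List Int) : ∀ (pre : List Int) (sev : Option Int) (D : Int),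
    pvLoopA suf (pre.length : Int) sev
        ((pre ++ suf).map (fun n => (n, D + (pre.length : Int))))
      = pvAltGo D suf (pre.length : Int) sev := by
  induction suf with
  | nil => intro pre sev D; rfl
  | cons depth rest ih =>
      intro pre sev D
      simp only [pvLoopA, pvAltGo, List.map_map]
      rw [pvPyGetAt]
      have hupd : (pre ++ depth :: rest).map
            ((fun s : Int × Int => (s.1, s.2 + 1)) ∘ (fun n => (n, D + (pre.length : Int))))
          = (pre ++ depth :: rest).map (fun n => (n, D + ((pre.length : Int) + 1))) := by
        apply List.map_congr_left
        intro n _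
        simp only [Function.comp_apply, Prod.mk.injEq]
        exact ⟨by trivial, by ring⟩
      rw [hupd]
      have key := ih (pre ++ [depth])
          (if pvScanVal depth (D + (pre.length : Int)) = some 0
           then some (sev.getD 0 + (pre.length : Int) * depth) else sev) D
      simp only [List.append_assoc, List.singleton_append, List.length_append,
        List.length_cons, List.length_nil] at key
      push_cast at key
      have hcond := pvScanVal_eq_some_zero depth (D + (pre.length : Int))
      by_cases hc : pvScanVal depth (D + (pre.length : Int)) = some 0
      · simp only [Function.comp_apply, Option.some.injEq]
        rw [if_pos hc, if_pos (hcond.mp hc)]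
        rw [if_pos hc] at key
        exact key
      · simp only [Function.comp_apply, Option.some.injEq]
        rw [if_neg hc, if_neg (fun h => hc (hcond.mpr h))]
        rw [if_neg hc] at key
        exact key

-- ===== VERDICT (by name: the statement is the Claim_ definition above) =====
theorem trip_severity_spec : Claim_equal_trip_severity := by
  intro depths delay _
  unfold Spec_trip_severity trip_severity trip_severity_alt
  rw [pvDelayFold]
  have h := pvLoopA_eq depths [] none (if delay > 0 then delay else 0)
  simp only [List.length_nil, Nat.cast_zero, List.nil_append, add_zero] at h
  rw [← h]
  congr 1
  simp only [List.map_map]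
  apply List.map_congr_left
  intro n _
  simp only [Function.comp_apply, Prod.mk.injEq, pvRangeLen delay]
  refine ⟨by trivial, by omega⟩
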